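-- pv_equiv track=rewrite | github.com/stefantaubert/textgrid-ipa | src/textgrid_tools/intervals/symbols_joining.py | merge_left_core
-- ===== SOURCE A (Python) =====
-- from typing import Generator, List, Optional, Set, Tuple, cast
--
-- def merge_left_core(symbols: Tuple[str, ...], merge_symbols: Set[str], ignore_merge_symbols: Set[str]) -> Tuple[Tuple[str, ...]]:
--   j = 0
--   reversed_symbols = symbols[::-1]
--   reversed_merged_symbols = []
--   while j < len(reversed_symbols):
--     new_symbol, j = get_next_merged_left_symbol_and_index(
--       reversed_symbols, j, merge_symbols, ignore_merge_symbols)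
--     reversed_merged_symbols.append(new_symbol)
--   merged_symbols = reversed_merged_symbols[::-1]
--   return tuple(merged_symbols)
--
-- def get_next_merged_left_symbol_and_index(symbols: Tuple[str, ...], j: int, merge_symbols: Set[str], ignore_merge_symbols: Set[str]) -> Tuple[str, int]:
--   new_symbol = [symbols[j]]
--   j += 1
--   if new_symbol[0] not in ignore_merge_symbols and new_symbol[0] not in merge_symbols:
--     while j < len(symbols) and symbols[j] in merge_symbols:
--       new_symbol.insert(0, symbols[j])
--       j += 1
--   return tuple(new_symbol), j
-- ===== SOURCE B (Python) =====
-- def merge_left_core(symbols, merge_symbols, ignore_merge_symbols):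
--   result = []
--   pending = []
--   for s in symbols:
--     if s in merge_symbols:
--       pending.append(s)
--     elif s in ignore_merge_symbols:
--       for p in pending:
--         result.append((p,))
--       pending = []
--       result.append((s,))
--     else:
--       result.append(tuple(pending + [s]))
--       pending = []
--   for p in pending:
--     result.append((p,))
--   return tuple(result)
-- ===== Notes on version B (the rewrite author's own statement) =====
-- stated objective: simpler
-- what changed: A scans the reversed list with an index-returning helper that looks ahead to absorb merge symbols and reverses the result; B is a single forward pass that accumulates pending merge symbols and flushes them onto the next core symbol (or as singletons at an ignore symbol / end of input).
import Mathlib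
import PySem

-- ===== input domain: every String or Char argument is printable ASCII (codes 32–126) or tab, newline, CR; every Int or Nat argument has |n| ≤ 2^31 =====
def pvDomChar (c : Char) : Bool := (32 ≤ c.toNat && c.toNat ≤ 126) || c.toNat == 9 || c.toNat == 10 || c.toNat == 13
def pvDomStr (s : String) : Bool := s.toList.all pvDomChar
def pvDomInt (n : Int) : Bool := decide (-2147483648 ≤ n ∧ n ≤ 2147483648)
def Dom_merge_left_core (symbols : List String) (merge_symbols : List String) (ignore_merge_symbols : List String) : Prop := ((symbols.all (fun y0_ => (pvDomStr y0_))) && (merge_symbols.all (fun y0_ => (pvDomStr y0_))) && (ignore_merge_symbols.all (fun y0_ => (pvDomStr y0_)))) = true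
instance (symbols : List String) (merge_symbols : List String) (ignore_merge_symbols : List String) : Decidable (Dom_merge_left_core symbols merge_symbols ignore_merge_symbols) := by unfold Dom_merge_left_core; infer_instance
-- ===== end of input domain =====

-- B replaces A's reversed index scan (helper with lookahead absorption) by one forward pass with a
-- `pending` accumulator of merge symbols — a simpler decomposition, same asymptotic cost.

-- ===== PORT A =====
-- inner while loop of get_next_merged_left_symbol_and_index: absorbs merge symbols, inserting at front
def pvAbsorb (symbols : List String) (j : Nat) (merge_symbols : List String)
    (new_symbol : List String) : List String × Nat :=
  if h : j < symbols.length ∧ symbols.getD j "" ∈ merge_symbols then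
    pvAbsorb symbols (j + 1) merge_symbols (symbols.getD j "" :: new_symbol)
  else
    (new_symbol, j)
termination_by symbols.length - j
decreasing_by omega

theorem pvAbsorb_le (symbols : List String) (j : Nat) (merge_symbols : List String)
    (new_symbol : List String) : j ≤ (pvAbsorb symbols j merge_symbols new_symbol).2 := by
  fun_induction pvAbsorb with
  | case1 j acc h ih => omega
  | case2 j acc h => simp

def get_next_merged_left_symbol_and_index (symbols : List String) (j : Nat)
    (merge_symbols : List String) (ignore_merge_symbols : List String) : List String × Nat :=
  -- new_symbol = [symbols[j]]; its element 0 is symbols[j] (written inline, no let)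
  if symbols.getD j "" ∉ ignore_merge_symbols ∧ symbols.getD j "" ∉ merge_symbols then
    pvAbsorb symbols (j + 1) merge_symbols [symbols.getD j ""]
  else
    ([symbols.getD j ""], j + 1)

theorem get_next_lt (symbols : List String) (j : Nat) (merge_symbols ignore_merge_symbols : List String) :
    j < (get_next_merged_left_symbol_and_index symbols j merge_symbols ignore_merge_symbols).2 := by
  unfold get_next_merged_left_symbol_and_index
  split
  · have := pvAbsorb_le symbols (j + 1) merge_symbols [symbols.getD j ""]
    omega
  · simp

-- the while loop of merge_left_core
def pvLoopA (reversed_symbols : List String) (merge_symbols ignore_merge_symbols : List String)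
    (j : Nat) (acc : List (List String)) : List (List String) :=
  if _h : j < reversed_symbols.length then
    let r := get_next_merged_left_symbol_and_index reversed_symbols j merge_symbols ignore_merge_symbols
    pvLoopA reversed_symbols merge_symbols ignore_merge_symbols r.2 (acc ++ [r.1])
  else
    acc
termination_by reversed_symbols.length - j
decreasing_by
  have := get_next_lt reversed_symbols j merge_symbols ignore_merge_symbols
  omega

def merge_left_core (symbols : List String) (merge_symbols : List String)
    (ignore_merge_symbols : List String) : List (List String) :=
  let reversed_symbols := (PySem.List.slice? symbols none none (-1)).getD []
  let reversed_merged_symbols := pvLoopA reversed_symbols merge_symbols ignore_merge_symbols 0 []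
  (PySem.List.slice? reversed_merged_symbols none none (-1)).getD []

-- ===== PORT B =====
-- forward pass with a pending list of accumulated merge symbols
def pvLoopB (symbols : List String) (merge_symbols ignore_merge_symbols : List String)
    (pending : List String) (result : List (List String)) : List (List String) :=
  match symbols with
  | [] => result ++ pending.map (fun p => [p])
  | s :: rest =>
    if s ∈ merge_symbols then
      pvLoopB rest merge_symbols ignore_merge_symbols (pending ++ [s]) result
    else if s ∈ ignore_merge_symbols then
      pvLoopB rest merge_symbols ignore_merge_symbols []
        (result ++ pending.map (fun p => [p]) ++ [[s]])
    else
      pvLoopB rest merge_symbols ignore_merge_symbols [] (result ++ [pending ++ [s]])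

def merge_left_core_alt (symbols : List String) (merge_symbols : List String)
    (ignore_merge_symbols : List String) : List (List String) :=
  pvLoopB symbols merge_symbols ignore_merge_symbols [] []

-- ===== PRECONDITION & SPEC =====
def Spec_merge_left_core (symbols : List String) (merge_symbols : List String) (ignore_merge_symbols : List String) (out : List (List String)) : Prop := out = merge_left_core_alt symbols merge_symbols ignore_merge_symbols
instance (symbols : List String) (merge_symbols : List String) (ignore_merge_symbols : List String) (out : List (List String)) : Decidable (Spec_merge_left_core symbols merge_symbols ignore_merge_symbols out) := by unfold Spec_merge_left_core; infer_instance

-- ===== CLAIM (what is proved, stated in full; the proofs are below) =====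
def Claim_equal_merge_left_core : Prop := ∀ (symbols : List String) (merge_symbols : List String) (ignore_merge_symbols : List String), Dom_merge_left_core symbols merge_symbols ignore_merge_symbols → Spec_merge_left_core symbols merge_symbols ignore_merge_symbols (merge_left_core symbols merge_symbols ignore_merge_symbols)

-- ===== LEMMAS AND PROOFS =====

-- reference recursion: A's scan of the reversed list, phrased structurally
def pvScan (merge_symbols ignore_merge_symbols : List String) : List String → List (List String)
  | [] => []
  | s :: rest =>
    if s ∉ ignore_merge_symbols ∧ s ∉ merge_symbols then
      ((rest.takeWhile (fun x => decide (x ∈ merge_symbols))).reverse ++ [s]) ::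
        pvScan merge_symbols ignore_merge_symbols (rest.dropWhile (fun x => decide (x ∈ merge_symbols)))
    else
      [s] :: pvScan merge_symbols ignore_merge_symbols rest
termination_by l => l.length
decreasing_by
  · have := List.length_dropWhile_le (fun x => decide (x ∈ merge_symbols)) rest
    simp; omega
  · simp

theorem pvScan_nil (m i : List String) : pvScan m i [] = [] := by rw [pvScan]

theorem pvScan_cons (m i : List String) (s : String) (rest : List String) :
    pvScan m i (s :: rest) =
      if s ∉ i ∧ s ∉ m then
        ((rest.takeWhile (fun x => decide (x ∈ m))).reverse ++ [s]) ::
          pvScan m i (rest.dropWhile (fun x => decide (x ∈ m)))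
      else [s] :: pvScan m i rest := by rw [pvScan]

theorem pvAbsorb_eq (m : List String) (l : List String) (j : Nat) (acc : List String) :
    pvAbsorb l j m acc =
      (((l.drop j).takeWhile (fun x => decide (x ∈ m))).reverse ++ acc,
        j + ((l.drop j).takeWhile (fun x => decide (x ∈ m))).length) := by
  fun_induction pvAbsorb with
  | case1 j acc h ih =>
    obtain ⟨hj, hm⟩ := h
    rw [List.getD_eq_getElem l "" hj] at *
    rw [ih, List.drop_eq_getElem_cons hj]
    simp only [List.takeWhile_cons, hm, decide_true, if_true, Prod.mk.injEq,
      List.reverse_cons, List.length_cons]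
    constructor
    · simp
    · omega
  | case2 j acc h =>
    by_cases hj : j < l.length
    · have hm : l.getD j "" ∉ m := fun hmm => h ⟨hj, hmm⟩
      rw [List.getD_eq_getElem l "" hj] at hm
      rw [List.drop_eq_getElem_cons hj]
      simp [hm]
    · rw [List.drop_eq_nil_of_le (by omega)]
      simp

theorem dropWhile_eq_drop_len (p : String → Bool) (l : List String) :
    l.dropWhile p = l.drop (l.takeWhile p).length := by
  induction l with
  | nil => simp
  | cons x t ih =>
    by_cases hx : p x
    · simp [hx, ih]
    · simp [hx]

theorem pvLoopA_eq (m i : List String) (l : List String) (j : Nat) (acc : List (List String)) :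
    pvLoopA l m i j acc = acc ++ pvScan m i (l.drop j) := by
  fun_induction pvLoopA with
  | case1 j acc h r ih =>
    rw [ih]
    have hrdef : r = get_next_merged_left_symbol_and_index l j m i := rfl
    rw [List.drop_eq_getElem_cons h]
    by_cases hc : l[j] ∉ i ∧ l[j] ∉ m
    · have hr : r = ((((l.drop (j+1)).takeWhile (fun x => decide (x ∈ m))).reverse ++ [l[j]]),
          (j+1) + ((l.drop (j+1)).takeWhile (fun x => decide (x ∈ m))).length) := by
        rw [hrdef]
        unfold get_next_merged_left_symbol_and_index
        rw [List.getD_eq_getElem l "" h, if_pos hc, pvAbsorb_eq]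
      rw [hr, pvScan_cons]
      simp only [hc, and_self]
      rw [dropWhile_eq_drop_len (fun x => decide (x ∈ m)) (l.drop (j+1)), List.drop_drop]
      simp
    · have hr : r = ([l[j]], j + 1) := by
        rw [hrdef]
        unfold get_next_merged_left_symbol_and_index
        rw [List.getD_eq_getElem l "" h, if_neg hc]
      rw [hr, pvScan_cons]
      simp only [hc, if_false]
      simp
  | case2 j acc h =>
    rw [List.drop_eq_nil_of_le (by omega), pvScan_nil]
    simp

theorem pvScan_all_merge (m i : List String) (ps : List String) (h : ∀ p ∈ ps, p ∈ m) :
    pvScan m i ps = ps.map (fun p => [p]) := by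
  induction ps with
  | nil => simp [pvScan_nil]
  | cons x t ih =>
    have hx : x ∈ m := h x (by simp)
    rw [pvScan_cons]
    simp only [hx, not_true, and_false, if_false, List.map_cons]
    rw [ih (fun p hp => h p (by simp [hp]))]

theorem takeWhile_append_stop (p : String → Bool) (s : String) (hs : p s = false)
    (t ys : List String) :
    (t ++ s :: ys).takeWhile p = t.takeWhile p ∧
    (t ++ s :: ys).dropWhile p = t.dropWhile p ++ s :: ys := by
  induction t with
  | nil => simp [hs]
  | cons x r ih =>
    by_cases hx : p x
    · simp [hx, ih.1, ih.2]
    · simp [hx]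

theorem pvScan_split (m i : List String) (s : String) (hs : s ∉ m) :
    ∀ (xs ys : List String), pvScan m i (xs ++ s :: ys) = pvScan m i xs ++ pvScan m i (s :: ys) := by
  intro xs
  induction hn : xs.length using Nat.strong_induction_on generalizing xs with
  | _ n ih =>
    intro ys
    match xs with
    | [] => simp [pvScan_nil]
    | x :: t =>
      have hsb : (fun x => decide (x ∈ m)) s = false := by simp [hs]
      by_cases hc : x ∉ i ∧ x ∉ m
      · rw [List.cons_append]
        simp only [pvScan_cons, hc, and_self]
        rw [(takeWhile_append_stop _ s hsb t ys).1, (takeWhile_append_stop _ s hsb t ys).2]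
        rw [ih (t.dropWhile (fun x => decide (x ∈ m))).length
              (by have := List.length_dropWhile_le (fun x => decide (x ∈ m)) t; simp at hn; omega)
              _ rfl]
        rw [pvScan_cons]
        simp
      · rw [List.cons_append]
        simp only [pvScan_cons, hc, if_false]
        rw [ih t.length (by simp at hn; omega) t rfl]
        simp only [List.cons_append]
        rw [pvScan_cons]

theorem pvLoopB_eq (m i : List String) (l : List String) (pending : List String)
    (acc : List (List String)) (hp : ∀ p ∈ pending, p ∈ m) :
    pvLoopB l m i pending acc = acc ++ (pvScan m i ((pending ++ l).reverse)).reverse := by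
  induction l generalizing pending acc with
  | nil =>
    rw [pvLoopB]
    simp only [List.append_nil]
    rw [pvScan_all_merge m i pending.reverse
          (by intro p hp'; exact hp p (by simpa using hp'))]
    simp
  | cons s rest ih =>
    rw [pvLoopB]
    by_cases hsm : s ∈ m
    · simp only [hsm, if_true]
      rw [ih (pending ++ [s]) acc (by intro p hp'
                                      simp only [List.mem_append, List.mem_singleton] at hp'
                                      rcases hp' with h | h
                                      · exact hp p h
                                      · subst h; exact hsm)]
      simp
    · have hrw : (pending ++ s :: rest).reverse = rest.reverse ++ s :: pending.reverse := by
        simp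
      rw [hrw, pvScan_split m i s hsm]
      by_cases hsi : s ∈ i
      · simp only [hsm, hsi, if_false, if_true]
        rw [ih [] _ (by simp)]
        rw [pvScan_cons]
        simp only [hsi, not_true, false_and, if_false]
        rw [pvScan_all_merge m i pending.reverse
              (by intro p hp'; exact hp p (by simpa using hp'))]
        simp
      · simp only [hsm, hsi, if_false]
        rw [ih [] _ (by simp)]
        rw [pvScan_cons]
        simp only [hsi, hsm, not_false_iff, and_self, if_true]
        rw [List.takeWhile_eq_self_iff.mpr
              (by intro x hx; simp only [decide_eq_true_eq]; exact hp x (by simpa using hx)),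
            List.dropWhile_eq_nil_iff.mpr
              (by intro x hx; simp only [decide_eq_true_eq]; exact hp x (by simpa using hx))]
        rw [pvScan_nil]
        simp

-- ===== VERDICT (by name: the statement is the Claim_ definition above) =====
theorem merge_left_core_spec : Claim_equal_merge_left_core := by
  intro symbols m i _
  show merge_left_core symbols m i = merge_left_core_alt symbols m i
  unfold merge_left_core merge_left_core_alt
  rw [PySem.List.slice?_none_none_neg_one]
  simp only [Option.getD_some]
  rw [pvLoopA_eq m i symbols.reverse 0 []]
  rw [PySem.List.slice?_none_none_neg_one]
  simp only [Option.getD_some, List.drop_zero, List.nil_append]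
  rw [pvLoopB_eq m i symbols [] [] (by simp)]
  simp
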